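-- pv_equiv track=rewrite | github.com/meyupy/slide-puzzle-3x3-pictured-solver | main.py | find_empty_sq_and_neighbor_indexes
-- ===== SOURCE A (Python) =====
-- def find_empty_sq_and_neighbor_indexes(perm):
--
--     empty_sq_index = [perm.index(number) + 1 for number in perm if number is None][0]
--     neighbor_indexes = []
--     amounts = []
--
--     if empty_sq_index in [2, 5, 8]:
--         amounts = [-1, 1, -3, 3]
--     elif empty_sq_index in [1, 4, 7]:
--         amounts = [1, -3, 3]
--     elif empty_sq_index in [3, 6, 9]:
--         amounts = [-1, -3, 3]
--
--     for amount in amounts: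
--         neighbor_index = empty_sq_index + amount
--         if 1 <= neighbor_index <= 9:
--             neighbor_indexes.append(neighbor_index)
--
--     return empty_sq_index, neighbor_indexes
-- ===== SOURCE B (Python) =====
-- NEIGHBORS = {
--     1: [2, 4],
--     2: [1, 3, 5],
--     3: [2, 6],
--     4: [5, 1, 7],
--     5: [4, 6, 2, 8],
--     6: [5, 3, 9],
--     7: [8, 4],
--     8: [7, 9, 5],
--     9: [8, 6],
-- }
--
--
-- def find_empty_sq_and_neighbor_indexes(perm):
--     empty_sq_index = perm.index(None) + 1
--     return empty_sq_index, list(NEIGHBORS[empty_sq_index])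
-- ===== Notes on version B (the rewrite author's own statement) =====
-- stated objective: alternative
-- what changed: Replaced A's comprehension-based index search and offset-arithmetic neighbor computation (column tables plus a 1..9 range filter loop) with a direct perm.index(None) and a single precomputed adjacency table keyed by the empty square's index.
-- outside the precondition, e.g. on find_empty_sq_and_neighbor_indexes([1, 2, 3, 4, 5, 6, 7, 8, 9, None]): A returns (10, []), B raises KeyError; on find_empty_sq_and_neighbor_indexes([1, 2]): A raises IndexError, B raises ValueError
import Mathlib
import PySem

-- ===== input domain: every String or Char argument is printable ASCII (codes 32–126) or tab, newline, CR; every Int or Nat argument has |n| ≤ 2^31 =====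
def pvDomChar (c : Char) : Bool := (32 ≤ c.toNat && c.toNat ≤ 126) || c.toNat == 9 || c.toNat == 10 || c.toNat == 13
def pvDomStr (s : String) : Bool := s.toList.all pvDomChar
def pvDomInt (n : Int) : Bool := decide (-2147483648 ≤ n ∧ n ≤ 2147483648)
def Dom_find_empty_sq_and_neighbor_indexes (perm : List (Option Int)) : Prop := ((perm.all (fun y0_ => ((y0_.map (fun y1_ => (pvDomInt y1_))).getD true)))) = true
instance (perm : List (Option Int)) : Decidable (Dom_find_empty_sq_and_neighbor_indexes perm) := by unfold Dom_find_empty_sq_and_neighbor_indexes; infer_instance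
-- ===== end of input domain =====

-- B replaces A's offset-arithmetic neighbor computation with a precomputed adjacency
-- table keyed by the empty square's index (objective: alternative).


-- ===== PORT A =====
def find_empty_sq_and_neighbor_indexes (perm : List (Option Int)) : Int × List Int :=
  -- [perm.index(number) + 1 for number in perm if number is None][0]
  -- (the [0] raises IndexError when no None is present; Pre_ excludes that, .getD 0 unreachable)
  let comp : List Int := (perm.filter (fun number => number == none)).map
    (fun number => (((PySem.List.index? perm number).getD 0 : Nat) : Int) + 1)
  let empty_sq_index : Int := (PySem.List.pyGet? comp 0).getD 0
  let amounts : List Int :=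
    if empty_sq_index ∈ ([2, 5, 8] : List Int) then [-1, 1, -3, 3]
    else if empty_sq_index ∈ ([1, 4, 7] : List Int) then [1, -3, 3]
    else if empty_sq_index ∈ ([3, 6, 9] : List Int) then [-1, -3, 3]
    else []
  let neighbor_indexes : List Int := amounts.foldl (fun acc amount =>
    let neighbor_index := empty_sq_index + amount
    if 1 ≤ neighbor_index ∧ neighbor_index ≤ 9 then acc ++ [neighbor_index] else acc) []
  (empty_sq_index, neighbor_indexes)

-- ===== PORT B =====
-- the module-level NEIGHBORS dict of Source B
def pvNEIGHBORS : PySem.Dict Int (List Int) := PySem.Dict.ofList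
  [(1, [2, 4]), (2, [1, 3, 5]), (3, [2, 6]), (4, [5, 1, 7]), (5, [4, 6, 2, 8]),
   (6, [5, 3, 9]), (7, [8, 4]), (8, [7, 9, 5]), (9, [8, 6])]

def find_empty_sq_and_neighbor_indexes_alt (perm : List (Option Int)) : Int × List Int :=
  -- perm.index(None) raises ValueError when no None is present; Pre_ excludes that
  let empty_sq_index : Int := (((PySem.List.index? perm (none : Option Int)).getD 0 : Nat) : Int) + 1
  -- NEIGHBORS[empty_sq_index] raises KeyError when the index is off the 3×3 board; Pre_ excludes that
  (empty_sq_index, (PySem.Dict.get? pvNEIGHBORS empty_sq_index).getD [])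

-- ===== PRECONDITION & SPEC =====
-- Pre_ excludes inputs with no None (A raises IndexError on the [0] subscript, B ValueError)
-- and inputs whose first None lies beyond the first 9 positions: those are not 3×3 boards,
-- A returns an accidental (index, []) there while B raises KeyError.
def Pre_find_empty_sq_and_neighbor_indexes (perm : List (Option Int)) : Prop :=
  none ∈ perm.take 9
instance (perm : List (Option Int)) : Decidable (Pre_find_empty_sq_and_neighbor_indexes perm) := by
  unfold Pre_find_empty_sq_and_neighbor_indexes; infer_instance

def pvWitness_find_empty_sq_and_neighbor_indexes : List (Option Int) :=
  [some 1, some 2, some 3, some 4, none, some 5, some 6, some 7, some 8]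

def Spec_find_empty_sq_and_neighbor_indexes (perm : List (Option Int)) (out : Int × List Int) : Prop := out = find_empty_sq_and_neighbor_indexes_alt perm
instance (perm : List (Option Int)) (out : Int × List Int) : Decidable (Spec_find_empty_sq_and_neighbor_indexes perm out) := by unfold Spec_find_empty_sq_and_neighbor_indexes; infer_instance

-- ===== CLAIM (what is proved, stated in full; the proofs are below) =====
def Claim_equal_find_empty_sq_and_neighbor_indexes : Prop := ∀ (perm : List (Option Int)), Dom_find_empty_sq_and_neighbor_indexes perm → Pre_find_empty_sq_and_neighbor_indexes perm → Spec_find_empty_sq_and_neighbor_indexes perm (find_empty_sq_and_neighbor_indexes perm)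

-- ===== LEMMAS AND PROOFS =====

-- The first None sits at some index k < 9.
lemma index_small (perm : List (Option Int))
    (hpre : (none : Option Int) ∈ perm.take 9) :
    ∃ k : Nat, k < 9 ∧ PySem.List.index? perm (none : Option Int) = some k := by
  have hmem : (none : Option Int) ∈ perm := List.mem_of_mem_take hpre
  have hsome : (PySem.List.index? perm (none : Option Int)).isSome :=
    (PySem.List.index?_isSome_iff perm none).mpr hmem
  obtain ⟨k, hk⟩ := Option.isSome_iff_exists.mp hsome
  refine ⟨k, ?_, hk⟩
  obtain ⟨hklt, _, hmin⟩ := PySem.List.getElem_of_index?_eq_some hk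
  by_contra h
  obtain ⟨j, hj, hjget⟩ := List.mem_iff_getElem.mp hpre
  have hj9 : j < 9 := lt_of_lt_of_le hj (List.length_take_le 9 perm)
  rw [List.getElem_take] at hjget
  exact hmin j (by omega) hjget

theorem find_empty_sq_and_neighbor_indexes_spec : Claim_equal_find_empty_sq_and_neighbor_indexes := by
  intro perm _hdom hpre
  obtain ⟨k, hk9, hidx⟩ := index_small perm hpre
  have hmem : (none : Option Int) ∈ perm := List.mem_of_mem_take hpre
  unfold Spec_find_empty_sq_and_neighbor_indexes
  cases hf : perm.filter (fun number => number == none) with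
  | nil =>
      exfalso
      have : (none : Option Int) ∈ perm.filter (fun number => number == none) :=
        List.mem_filter.mpr ⟨hmem, by decide⟩
      rw [hf] at this
      exact absurd this (List.not_mem_nil)
  | cons y ys =>
      have hy : y = none := by
        have : y ∈ perm.filter (fun number => number == none) := by
          rw [hf]; exact List.mem_cons_self
        simpa using (List.mem_filter.mp this).2
      simp only [find_empty_sq_and_neighbor_indexes, find_empty_sq_and_neighbor_indexes_alt,
        hf, hy, hidx, List.map_cons, PySem.List.pyGet?_zero_cons, Option.getD_some]
      interval_cases k <;> decide
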